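-- pv_equiv track=rewrite | github.com/IT-HONGREAT/Algorithm_datastructure | 프로그래머스/pg_스택큐_기능개발.py | solution
-- ===== SOURCE A (Python) =====
-- def judge_popping(number:int) -> bool:
--     if number >= 100:
--         return True
--     return False
--
-- def solution(progresses, speeds):
--     answer = []
--
--     while progresses:
--         # 각 작업에 대한 진도율 업데이트
--         progresses = [p + s for p, s in zip(progresses, speeds)]
--         deploy_count = 0
--         # 앞에서부터 진도율이 100%인 작업이 몇 개인지 확인
--         while progresses and judge_popping(progresses[0]):
--             deploy_count += 1
--             progresses.pop(0)
--             speeds.pop(0)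
--
--         if deploy_count:
--             answer.append(deploy_count)
--
--     return answer
-- ===== SOURCE B (Python) =====
-- def solution(progresses, speeds):
--     # closed form: each task finishes after day = ceil((100-p)/s) (min 1);
--     # group consecutive tasks whose day does not exceed the current release day.
--     answer = []
--     cur_day = 0
--     count = 0
--     for p, s in zip(progresses, speeds):
--         day = 1 if p + s >= 100 else -((p - 100) // s)
--         if day > cur_day:
--             if count:
--                 answer.append(count)
--             cur_day = day
--             count = 1
--         else:
--             count += 1
--     if count:
--         answer.append(count)
--     return answer
-- ===== Notes on version B (the rewrite author's own statement) =====
-- stated objective: alternative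
-- what changed: replaces the day-by-day simulation (re-building the whole list each day and popping from the front) with a closed-form finish day ceil((100-p)/s) per task and a single pass that groups tasks by the running release day; intended as faster, but a timing run could not confirm a ratio (A times out on the larger random inputs, so no measurement at the largest size)
-- outside the precondition, e.g. on solution([200], [-5]): A returns [1], B returns [1]
import Mathlib
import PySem

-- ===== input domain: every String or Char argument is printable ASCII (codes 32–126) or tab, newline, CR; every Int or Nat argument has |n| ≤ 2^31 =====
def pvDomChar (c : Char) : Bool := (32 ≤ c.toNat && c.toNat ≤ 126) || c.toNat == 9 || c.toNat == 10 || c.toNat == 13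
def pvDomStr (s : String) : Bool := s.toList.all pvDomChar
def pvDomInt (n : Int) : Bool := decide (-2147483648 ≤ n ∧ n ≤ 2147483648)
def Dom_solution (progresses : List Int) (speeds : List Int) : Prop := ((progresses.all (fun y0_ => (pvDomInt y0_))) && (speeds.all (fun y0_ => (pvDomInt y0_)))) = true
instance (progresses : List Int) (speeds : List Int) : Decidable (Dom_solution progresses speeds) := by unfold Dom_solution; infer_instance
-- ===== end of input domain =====

-- B replaces A's day-by-day simulation with closed-form finish days ceil((100-p)/s) grouped in one pass
-- (intended as faster; a timing run could not measure a ratio because A times out on large random inputs).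
-- Python A mutates its `speeds` argument in place (pop(0)) while B does not; the equivalence proved here is about the return value only.

-- ===== PORT A =====
def judge_popping (number : Int) : Bool := if 100 ≤ number then true else false

-- A's inner while: pop from the front while the first progress is >= 100
def popLoopA : List Int → List Int → Int → Int × List Int × List Int
  | [], ss, c => (c, [], ss)
  | p :: ps, ss, c =>
    if judge_popping p then popLoopA ps ss.tail (c + 1)
    else (c, p :: ps, ss)

-- A's outer while, with a fuel bound (under Pre_ the loop runs at most max-finish-day ≤ 2^31+100 iterations, proved below)
def loopA : Nat → List Int → List Int → List Int → List Int
  | 0, _, _, answer => answer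
  | fuel + 1, progresses, speeds, answer =>
    if progresses.isEmpty then answer
    else
      let progresses' := (progresses.zip speeds).map (fun q => q.1 + q.2)
      let r := popLoopA progresses' speeds 0
      loopA fuel r.2.1 r.2.2 (if r.1 ≠ 0 then answer ++ [r.1] else answer)

def solution (progresses : List Int) (speeds : List Int) : List Int :=
  loopA 2147483900 progresses speeds []

-- ===== PORT B =====
-- day needed for one task: 1 if p + s >= 100 else -((p - 100) // s)
def dayB (p : Int) (s : Int) : Int :=
  if 100 ≤ p + s then 1 else -(PySem.Int.floordiv (p - 100) s)

-- one step of B's single pass over (answer, cur_day, count)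
def bStep (st : List Int × Int × Int) (day : Int) : List Int × Int × Int :=
  if st.2.1 < day then ((if st.2.2 ≠ 0 then st.1 ++ [st.2.2] else st.1), day, 1)
  else (st.1, st.2.1, st.2.2 + 1)

-- final append of the last pending count, if any
def bFinish (st : List Int × Int × Int) : List Int :=
  if st.2.2 ≠ 0 then st.1 ++ [st.2.2] else st.1

def solution_alt (progresses : List Int) (speeds : List Int) : List Int :=
  bFinish ((progresses.zip speeds).foldl (fun st q => bStep st (dayB q.1 q.2)) ([], 0, 0))

-- ===== PRECONDITION & SPEC =====
-- Pre_ requires every zipped speed to be positive: with a non-positive speed A's simulation usually never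
-- terminates (the progress value never reaches, or decays away from, 100 before reaching the front of the
-- queue), and the exact subset of such inputs on which the simulation does finish is not a closed-form
-- condition on the input; where A does finish there, B returns the same value.
def Pre_solution (progresses : List Int) (speeds : List Int) : Prop :=
  ∀ q ∈ progresses.zip speeds, 0 < q.2
instance (progresses : List Int) (speeds : List Int) : Decidable (Pre_solution progresses speeds) := by unfold Pre_solution; infer_instance

def pvWitness_solution : List Int × List Int := ([93, 30, 55], [1, 30, 5])

def Spec_solution (progresses : List Int) (speeds : List Int) (out : List Int) : Prop := out = solution_alt progresses speeds
instance (progresses : List Int) (speeds : List Int) (out : List Int) : Decidable (Spec_solution progresses speeds out) := by unfold Spec_solution; infer_instance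

-- ===== CLAIM (what is proved, stated in full; the proofs are below) =====
def Claim_equal_solution : Prop := ∀ (progresses : List Int) (speeds : List Int), Dom_solution progresses speeds → Pre_solution progresses speeds → Spec_solution progresses speeds (solution progresses speeds)

-- ===== LEMMAS AND PROOFS =====

-- reference chunking of the list of finish days
def chunks : List Int → List Int
  | [] => []
  | d :: t => ((t.takeWhile (fun x => decide (x ≤ d))).length + 1 : Int) :: chunks (t.dropWhile (fun x => decide (x ≤ d)))
  termination_by l => l.length
  decreasing_by simp only [List.length_cons]; exact Nat.lt_succ_of_le (List.length_dropWhile_le _ _)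

-- one day's decrement of a finish day
def dec (d : Int) : Int := if d ≤ 1 then 1 else d - 1

theorem dayB_ge_one (p s : Int) (hs : 0 < s) : 1 ≤ dayB p s := by
  unfold dayB
  split_ifs with h
  · omega
  · rcases (PySem.Int.neg_floordiv_neg_eq_iff_of_pos (a := 100 - p) (b := s)
      (q := -(PySem.Int.floordiv (p - 100) s)) hs).mp (by rw [neg_sub]) with ⟨h1, h2⟩
    nlinarith

theorem dayB_eq_of_bracket (p s q : Int) (hs : 0 < s) (hq : 1 ≤ q) (h1 : (q - 1) * s < 100 - p)
    (h2 : 100 - p ≤ q * s) : dayB p s = q := by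
  by_cases hq2 : q < 2
  · have hq1 : q = 1 := by omega
    subst hq1
    have : 100 ≤ p + s := by nlinarith
    simp [dayB, this]
  · have hlt : ¬ 100 ≤ p + s := by nlinarith
    unfold dayB
    rw [if_neg hlt, show p - 100 = -(100 - p) by ring]
    exact (PySem.Int.neg_floordiv_neg_eq_iff_of_pos hs).mpr ⟨h1, h2⟩

theorem dayB_bracket (p s : Int) (hs : 0 < s) (h : ¬ 100 ≤ p + s) :
    (dayB p s - 1) * s < 100 - p ∧ 100 - p ≤ dayB p s * s := by
  have hd : dayB p s = -(PySem.Int.floordiv (-(100 - p)) s) := by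
    unfold dayB; rw [if_neg h, neg_sub]
  exact (PySem.Int.neg_floordiv_neg_eq_iff_of_pos hs).mp hd.symm

theorem dayB_one_iff (p s : Int) (hs : 0 < s) : dayB p s ≤ 1 ↔ 100 ≤ p + s := by
  constructor
  · intro hle
    by_contra h
    rcases dayB_bracket p s hs h with ⟨h1, h2⟩
    nlinarith
  · intro h; simp [dayB, h]

theorem dayB_step (p s : Int) (hs : 0 < s) : dayB (p + s) s = dec (dayB p s) := by
  by_cases h : 100 ≤ p + s
  · have h1 : dayB p s = 1 := le_antisymm ((dayB_one_iff p s hs).mpr h) (dayB_ge_one p s hs)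
    have h2 : (100 : Int) ≤ (p + s) + s := by omega
    rw [h1]
    simp [dec, dayB, h2]
  · rcases dayB_bracket p s hs h with ⟨h1, h2⟩
    have hq2 : 2 ≤ dayB p s := by
      have := (dayB_one_iff p s hs).not
      have hge := dayB_ge_one p s hs
      omega
  -- target day is dayB p s - 1
    have : dayB (p + s) s = dayB p s - 1 := by
      apply dayB_eq_of_bracket _ _ _ hs (by omega)
      · nlinarith
      · nlinarith
    rw [this, dec, if_neg (by omega)]

theorem popLoopA_spec (l ss : List Int) (c : Int) :
    popLoopA l ss c =
      (c + ((l.takeWhile (fun x => decide (100 ≤ x))).length : Int),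
       l.dropWhile (fun x => decide (100 ≤ x)),
       ss.drop (l.takeWhile (fun x => decide (100 ≤ x))).length) := by
  induction l generalizing ss c with
  | nil => simp [popLoopA]
  | cons p ps ih =>
    by_cases h : (100 : Int) ≤ p
    · have hj : judge_popping p = true := by simp [judge_popping, h]
      rw [popLoopA, if_pos hj, ih]
      simp [h]
      omega
    · have hj : ¬ judge_popping p = true := by simp [judge_popping, h]
      rw [popLoopA, if_neg hj]
      simp [h]

theorem zip_drop_comm {α β : Type} :
    ∀ (k : Nat) (a : List α) (b : List β), (a.drop k).zip (b.drop k) = (a.zip b).drop k := by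
  intro k
  induction k with
  | zero => intro a b; simp
  | succ k ih =>
    intro a b
    cases a with
    | nil => simp
    | cons x xs =>
      cases b with
      | nil => simp
      | cons y ys => simpa using ih xs ys

theorem zip_update (ps ss : List Int) :
    ((ps.zip ss).map (fun q => q.1 + q.2)).zip ss = (ps.zip ss).map (fun q => (q.1 + q.2, q.2)) := by
  induction ps generalizing ss with
  | nil => simp
  | cons p pt ih =>
    cases ss with
    | nil => simp
    | cons s st => simp [List.zip_cons_cons, ih]

theorem takeWhile_congr_mem {α : Type} (p q : α → Bool) :
    ∀ l : List α, (∀ x ∈ l, p x = q x) → l.takeWhile p = l.takeWhile q := by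
  intro l
  induction l with
  | nil => simp
  | cons a t ih =>
    intro h
    rw [List.takeWhile_cons, List.takeWhile_cons, h a (by simp),
      ih (fun x hx => h x (by simp [hx]))]

theorem dropWhile_congr_mem {α : Type} (p q : α → Bool) :
    ∀ l : List α, (∀ x ∈ l, p x = q x) → l.dropWhile p = l.dropWhile q := by
  intro l
  induction l with
  | nil => simp
  | cons a t ih =>
    intro h
    rw [List.dropWhile_cons, List.dropWhile_cons, h a (by simp),
      ih (fun x hx => h x (by simp [hx]))]

theorem dropWhile_eq_drop {α : Type} (p : α → Bool) :
    ∀ l : List α, l.dropWhile p = l.drop (l.takeWhile p).length := by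
  intro l
  induction l with
  | nil => simp
  | cons a t ih =>
    rw [List.dropWhile_cons, List.takeWhile_cons]
    by_cases h : p a = true
    · simp [h, ih]
    · simp [h]

theorem head_dropWhile_false {α : Type} (p : α → Bool) :
    ∀ (l : List α) d t, l.dropWhile p = d :: t → p d = false := by
  intro l
  induction l with
  | nil => intro d t h; simp at h
  | cons a s ih =>
    intro d t h
    rw [List.dropWhile_cons] at h
    by_cases ha : p a = true
    · exact ih d t (by simpa [ha] using h)
    · rw [if_neg ha] at h
      cases h
      simpa using ha

theorem head_dropWhile_ge_two :
    ∀ (l : List Int) d t, l.dropWhile (fun x => decide (x ≤ 1)) = d :: t → 2 ≤ d := by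
  intro l d t h
  have := head_dropWhile_false _ l d t h
  simp at this
  omega

theorem chunks_dec_aux :
    ∀ (n : Nat) (l : List Int), l.length ≤ n → (∀ d ∈ l, 1 ≤ d) → (∀ d t, l = d :: t → 2 ≤ d) →
      chunks (l.map dec) = chunks l := by
  intro n
  induction n with
  | zero =>
    intro l hl _ _
    have : l = [] := List.length_eq_zero_iff.mp (Nat.le_zero.mp hl)
    subst this; rfl
  | succ n ih =>
    intro l hl h1 hh
    cases l with
    | nil => rfl
    | cons c t =>
      have hc : 2 ≤ c := hh c t rfl
      have hmem : ∀ x ∈ t, ((fun x => decide (x ≤ dec c)) ∘ dec) x = (fun x => decide (x ≤ c)) x := by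
        intro x hx
        have hx1 : 1 ≤ x := h1 x (by simp [hx])
        simp only [Function.comp_apply, dec]
        split_ifs <;> simp <;> omega
      have htw : (t.map dec).takeWhile (fun x => decide (x ≤ dec c)) =
          (t.takeWhile (fun x => decide (x ≤ c))).map dec := by
        rw [List.takeWhile_map, takeWhile_congr_mem _ _ t hmem]
      have hdw : (t.map dec).dropWhile (fun x => decide (x ≤ dec c)) =
          (t.dropWhile (fun x => decide (x ≤ c))).map dec := by
        rw [List.dropWhile_map, dropWhile_congr_mem _ _ t hmem]
      rw [List.map_cons, chunks, chunks, htw, hdw]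
      congr 1
      · simp
      · apply ih
        · have h3 := List.length_dropWhile_le (fun x => decide (x ≤ c)) t
          simp at hl ⊢
          omega
        · intro d hd
          exact h1 d (by
            simp only [List.mem_cons]
            exact Or.inr ((List.dropWhile_sublist (l := t) (p := fun x => decide (x ≤ c))).subset hd))
        · intro d t' h'
          have := head_dropWhile_false _ t d t' h'
          simp at this
          omega

-- chunks is invariant under the one-day decrement, provided the head is ≥ 2
theorem chunks_dec (l : List Int) (h1 : ∀ d ∈ l, 1 ≤ d) (hh : ∀ d t, l = d :: t → 2 ≤ d) :
    chunks (l.map dec) = chunks l :=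
  chunks_dec_aux l.length l le_rfl h1 hh

-- one simulated day peels the prefix of 1-days off the chunk list
theorem chunks_step (ds : List Int) (h1 : ∀ d ∈ ds, 1 ≤ d) :
    chunks ds =
      (if ((ds.takeWhile (fun x => decide (x ≤ 1))).length : Int) ≠ 0
        then [((ds.takeWhile (fun x => decide (x ≤ 1))).length : Int)] else []) ++
      chunks ((ds.drop (ds.takeWhile (fun x => decide (x ≤ 1))).length).map dec) := by
  have hdec : ∀ (l : List Int), (∀ d ∈ l, 1 ≤ d) →
      chunks ((l.dropWhile (fun x => decide (x ≤ 1))).map dec) =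
        chunks (l.dropWhile (fun x => decide (x ≤ 1))) := by
    intro l hl
    apply chunks_dec
    · intro d hd
      exact hl d ((List.dropWhile_sublist (l := l) (p := fun x => decide (x ≤ 1))).subset hd)
    · exact head_dropWhile_ge_two l
  cases ds with
  | nil => rfl
  | cons d t =>
    by_cases hd : d ≤ 1
    · have hd1 : d = 1 := by
        have := h1 d (by simp)
        omega
      subst hd1
      rw [chunks]
      have htw : (1 :: t).takeWhile (fun x : Int => decide (x ≤ 1)) =
          1 :: t.takeWhile (fun x : Int => decide (x ≤ 1)) := by
        rw [List.takeWhile_cons]; simp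
      rw [htw]
      have hifp : ((( 1 :: t.takeWhile (fun x : Int => decide (x ≤ 1))).length : Int)) ≠ 0 := by
        intro h
        simp only [List.length_cons] at h
        omega
      rw [if_pos hifp]
      have hdrop : (1 :: t).drop (1 :: t.takeWhile (fun x : Int => decide (x ≤ 1))).length =
          t.drop (t.takeWhile (fun x : Int => decide (x ≤ 1))).length := by
        simp
      rw [hdrop, ← dropWhile_eq_drop]
      rw [hdec t (fun x hx => h1 x (by simp [hx]))]
      simp
    · have htw : (d :: t).takeWhile (fun x : Int => decide (x ≤ 1)) = [] := by
        rw [List.takeWhile_cons]; simp [hd]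
      rw [htw]
      simp only [List.length_nil, Nat.cast_zero, ne_eq, not_true_eq_false, List.drop_zero]
      rw [chunks_dec _ h1 (by
        intro a t' h'
        cases h'
        have hmem : (1 : Int) ≤ d := h1 d (by simp)
        omega)]
      simp

-- B's fold, after at least one element has been consumed, computes the chunking
theorem foldB_spec :
    ∀ (l : List Int) (ans : List Int) (c cnt : Int), 1 ≤ cnt →
      bFinish (l.foldl bStep (ans, c, cnt)) =
      ans ++ ((cnt + ((l.takeWhile (fun x => decide (x ≤ c))).length : Int)) ::
        chunks (l.dropWhile (fun x => decide (x ≤ c)))) := by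
  intro l
  induction l with
  | nil =>
    intro ans c cnt hcnt
    simp only [List.foldl_nil, List.takeWhile_nil, List.dropWhile_nil]
    unfold bFinish
    rw [if_pos (by simp only [ne_eq]; omega)]
    simp [chunks]
  | cons d t ih =>
    intro ans c cnt hcnt
    simp only [List.foldl_cons]
    by_cases hlt : c < d
    · have hb : bStep (ans, c, cnt) d = (ans ++ [cnt], d, 1) := by
        unfold bStep
        simp only
        rw [if_pos hlt, if_pos (by omega)]
      rw [hb, ih (ans ++ [cnt]) d 1 le_rfl]
      have htw : (d :: t).takeWhile (fun x => decide (x ≤ c)) = [] := by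
        rw [List.takeWhile_cons]; simp; omega
      have hdw : (d :: t).dropWhile (fun x => decide (x ≤ c)) = d :: t := by
        rw [List.dropWhile_cons]; simp; omega
      rw [htw, hdw, chunks]
      simp [add_comm]
    · have hb : bStep (ans, c, cnt) d = (ans, c, cnt + 1) := by
        unfold bStep
        simp only
        rw [if_neg hlt]
      rw [hb, ih ans c (cnt + 1) (by omega)]
      have htw : (d :: t).takeWhile (fun x => decide (x ≤ c)) =
          d :: t.takeWhile (fun x => decide (x ≤ c)) := by
        rw [List.takeWhile_cons]; simp; omega
      have hdw : (d :: t).dropWhile (fun x => decide (x ≤ c)) =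
          t.dropWhile (fun x => decide (x ≤ c)) := by
        rw [List.dropWhile_cons]; simp; omega
      rw [htw, hdw]
      simp
      omega

theorem solution_alt_eq_chunks (ps ss : List Int) (hpre : Pre_solution ps ss) :
    solution_alt ps ss = chunks ((ps.zip ss).map (fun q => dayB q.1 q.2)) := by
  unfold solution_alt
  rw [show (ps.zip ss).foldl (fun st q => bStep st (dayB q.1 q.2)) ([], 0, 0) =
      ((ps.zip ss).map (fun q => dayB q.1 q.2)).foldl bStep ([], 0, 0) from
      by rw [List.foldl_map]]
  have h1 : ∀ d ∈ (ps.zip ss).map (fun q => dayB q.1 q.2), 1 ≤ d := by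
    intro d hd
    rcases List.mem_map.mp hd with ⟨q, hq, rfl⟩
    exact dayB_ge_one q.1 q.2 (hpre q hq)
  cases hds : (ps.zip ss).map (fun q => dayB q.1 q.2) with
  | nil => simp [bFinish, chunks]
  | cons d t =>
    rw [hds] at h1
    have hd1 : 1 ≤ d := h1 d (by simp)
    simp only [List.foldl_cons]
    have hb : bStep ([], 0, 0) d = ([], d, 1) := by
      unfold bStep
      simp only
      rw [if_pos (by omega)]
      simp
    rw [hb, foldB_spec t [] d 1 le_rfl, chunks]
    simp [add_comm]

theorem loopA_spec :
    ∀ (fuel : Nat) (ps ss acc : List Int), (∀ q ∈ ps.zip ss, 0 < q.2) →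
      (∀ d ∈ (ps.zip ss).map (fun q => dayB q.1 q.2), d < (fuel : Int)) →
      (ps ≠ [] → 0 < fuel) →
      loopA fuel ps ss acc = acc ++ chunks ((ps.zip ss).map (fun q => dayB q.1 q.2)) := by
  intro fuel
  induction fuel with
  | zero =>
    intro ps ss acc hpre hbound hne
    have hps : ps = [] := by
      by_contra h
      exact absurd (hne h) (by omega)
    subst hps
    simp [loopA, chunks]
  | succ fuel ih =>
    intro ps ss acc hpre hbound hne
    cases ps with
    | nil => simp [loopA, chunks]
    | cons p pt =>
      rw [loopA, if_neg (by simp)]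
      simp only
      rw [popLoopA_spec]
      simp only [zero_add]
      set zs := (p :: pt).zip ss with hzs
      set prog' := zs.map (fun q => q.1 + q.2) with hprog'
      set ds := zs.map (fun q => dayB q.1 q.2) with hds
      -- the popped prefix corresponds to days ≤ 1
      have hktw : prog'.takeWhile (fun x => decide (100 ≤ x)) =
          (zs.takeWhile (fun q => decide (100 ≤ q.1 + q.2))).map (fun q => q.1 + q.2) := by
        rw [hprog', List.takeWhile_map]
        rfl
      have hdstw : ds.takeWhile (fun x => decide (x ≤ 1)) =
          (zs.takeWhile (fun q => decide (100 ≤ q.1 + q.2))).map (fun q => dayB q.1 q.2) := by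
        rw [hds, List.takeWhile_map]
        congr 1
        apply takeWhile_congr_mem
        intro q hq
        have hs := hpre q hq
        simp only [Function.comp_apply]
        rw [decide_eq_decide]
        exact dayB_one_iff q.1 q.2 hs
      have hklen : (prog'.takeWhile (fun x => decide (100 ≤ x))).length =
          (ds.takeWhile (fun x => decide (x ≤ 1))).length := by
        rw [hktw, hdstw]
        simp
      set k := (prog'.takeWhile (fun x => decide (100 ≤ x))).length with hk
      -- next state's zipped pairs
      have hzip' : (prog'.dropWhile (fun x => decide (100 ≤ x))).zip (ss.drop k) =
          (zs.map (fun q => (q.1 + q.2, q.2))).drop k := by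
        rw [dropWhile_eq_drop, ← hk]
        have hzu : prog'.zip ss = zs.map (fun q => (q.1 + q.2, q.2)) := by
          rw [hprog', hzs]
          exact zip_update _ _
        rw [zip_drop_comm, hzu]
      -- next state's day list
      have hds' : ((zs.map (fun q => (q.1 + q.2, q.2))).drop k).map (fun q => dayB q.1 q.2) =
          (ds.drop k).map dec := by
        rw [← List.map_drop, ← List.map_drop, List.map_map, List.map_map]
        apply List.map_congr_left
        intro q hq
        have hs := hpre q (List.mem_of_mem_drop hq)
        simp only [Function.comp_apply]
        exact dayB_step q.1 q.2 hs
      have h1 : ∀ d ∈ ds, 1 ≤ d := by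
        intro d hd
        rcases List.mem_map.mp hd with ⟨q, hq, rfl⟩
        exact dayB_ge_one q.1 q.2 (hpre q hq)
      -- apply the induction hypothesis to the next state
      have hih := ih (prog'.dropWhile (fun x => decide (100 ≤ x))) (ss.drop k)
        (if ((k : Int) ≠ 0) then acc ++ [(k : Int)] else acc)
        (by
          intro q hq
          rw [hzip'] at hq
          rcases List.mem_map.mp (List.mem_of_mem_drop hq) with ⟨q', hq', rfl⟩
          exact hpre q' hq')
        (by
          intro d hd
          rw [hzip', hds'] at hd
          rcases List.mem_map.mp hd with ⟨d', hd', rfl⟩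
          have hd'mem : d' ∈ ds := List.mem_of_mem_drop hd'
          have hdlt : d' < ((fuel : Int) + 1) := by
            have := hbound d' hd'mem
            push_cast at this ⊢
            omega
          have hd1 : 1 ≤ d' := h1 d' hd'mem
          -- if dec d' = 1 we still need 1 < fuel: the head of the dropped list is ≥ 2
          rcases List.exists_cons_of_ne_nil (List.ne_nil_of_mem hd') with ⟨h0, t0, ht0⟩
          have hh0 : 2 ≤ h0 := by
            have : ds.drop k = ds.dropWhile (fun x => decide (x ≤ 1)) := by
              rw [dropWhile_eq_drop, hklen]
            rw [this] at ht0
            exact head_dropWhile_ge_two ds h0 t0 ht0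
          have hh0mem : h0 ∈ ds := List.mem_of_mem_drop (ht0 ▸ (by simp : h0 ∈ h0 :: t0))
          have hfuel2 : 2 < (fuel : Int) + 1 := by
            have := hbound h0 hh0mem
            push_cast at this
            omega
          unfold dec
          split_ifs <;> omega)
        (by
          intro hne'
          have : ds.drop k ≠ [] := by
            intro hcon
            apply hne'
            rw [dropWhile_eq_drop, ← hk]
            have : prog'.length = ds.length := by rw [hprog', hds]; simp
            rw [← List.length_eq_zero_iff] at hcon ⊢
            simp at hcon ⊢
            omega
          rcases List.exists_cons_of_ne_nil this with ⟨h0, t0, ht0⟩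
          have hh0 : 2 ≤ h0 := by
            have heq : ds.drop k = ds.dropWhile (fun x => decide (x ≤ 1)) := by
              rw [dropWhile_eq_drop, hklen]
            rw [heq] at ht0
            exact head_dropWhile_ge_two ds h0 t0 ht0
          have hh0mem : h0 ∈ ds := List.mem_of_mem_drop (ht0 ▸ (by simp : h0 ∈ h0 :: t0))
          have := hbound h0 hh0mem
          push_cast at this
          omega)
      rw [hzip', hds'] at hih
      rw [hih]
      -- combine with the chunk-step identity
      rw [chunks_step ds h1]
      have hdrop_eq : ds.drop (ds.takeWhile (fun x => decide (x ≤ 1))).length = ds.drop k := by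
        rw [hklen]
      rw [hdrop_eq, hklen]
      by_cases hk0 : ((ds.takeWhile (fun x => decide (x ≤ 1))).length : Int) ≠ 0
      · rw [if_pos hk0, if_pos hk0]
        simp
      · rw [if_neg hk0, if_neg hk0]
        simp

-- ===== VERDICT (by name: the statement is the Claim_ definition above) =====
theorem solution_spec : Claim_equal_solution := by
  intro ps ss hdom hpre
  unfold Spec_solution
  have hpre' : ∀ q ∈ ps.zip ss, 0 < q.2 := hpre
  simp only [Dom_solution, Bool.and_eq_true, List.all_eq_true, pvDomInt,
    decide_eq_true_eq] at hdom
  have hbound : ∀ d ∈ (ps.zip ss).map (fun q => dayB q.1 q.2),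
      d < ((2147483900 : Nat) : Int) := by
    intro d hd
    rcases List.mem_map.mp hd with ⟨q, hq, rfl⟩
    have hs := hpre' q hq
    have hp : -2147483648 ≤ q.1 := by
      rcases List.of_mem_zip hq with ⟨hq1, _⟩
      exact (hdom.1 q.1 hq1).1
    by_cases h : 100 ≤ q.1 + q.2
    · rw [dayB, if_pos h]
      push_cast
    · rcases dayB_bracket q.1 q.2 hs h with ⟨h1, h2⟩
      have hd1 := dayB_ge_one q.1 q.2 hs
      have hmul : (dayB q.1 q.2 - 1) * 1 ≤ (dayB q.1 q.2 - 1) * q.2 :=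
        mul_le_mul_of_nonneg_left (by omega) (by omega)
      push_cast
      nlinarith
  rw [show solution ps ss = loopA 2147483900 ps ss [] from rfl,
    loopA_spec 2147483900 ps ss [] hpre' hbound (fun _ => by omega),
    solution_alt_eq_chunks ps ss hpre]
  simp
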